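-- pv_equiv track=rewrite | github.com/tenj1n/SingingApp | tools/02_compare_with_reference.py | segment_mask
-- ===== SOURCE A (Python) =====
-- from typing import List, Dict, Any, Optional
--
-- def segment_mask(mask: List[bool], min_len_frames: int):
--     """True が連続する区間を [start, end) で返す（end は含まない）"""
--     out = []
--     s = None
--     for i, v in enumerate(mask + [False]):  # 番兵
--         if v and s is None:
--             s = i
--         elif not v and s is not None:
--             if i - s >= min_len_frames:
--                 out.append((s, i))
--             s = None
--     return out
-- ===== SOURCE B (Python) =====
-- def segment_mask(mask, min_len_frames):
--     """True が連続する区間を [start, end) で返す（end は含まない）"""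
--     padded = [False] + list(mask) + [False]
--     starts = [i for i in range(len(padded) - 1) if padded[i + 1] and not padded[i]]
--     ends = [i for i in range(len(padded) - 1) if padded[i] and not padded[i + 1]]
--     return [(s, e) for s, e in zip(starts, ends) if e - s >= min_len_frames]
-- ===== Notes on version B (the rewrite author's own statement) =====
-- stated objective: alternative
-- what changed: Replaced A's single-pass sentinel/None state machine with staged edge detection: pad the mask with False on both sides, collect rising-edge and falling-edge indices in two comprehensions over adjacent pairs, then zip them into intervals and filter by the minimum length.
import Mathlib
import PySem

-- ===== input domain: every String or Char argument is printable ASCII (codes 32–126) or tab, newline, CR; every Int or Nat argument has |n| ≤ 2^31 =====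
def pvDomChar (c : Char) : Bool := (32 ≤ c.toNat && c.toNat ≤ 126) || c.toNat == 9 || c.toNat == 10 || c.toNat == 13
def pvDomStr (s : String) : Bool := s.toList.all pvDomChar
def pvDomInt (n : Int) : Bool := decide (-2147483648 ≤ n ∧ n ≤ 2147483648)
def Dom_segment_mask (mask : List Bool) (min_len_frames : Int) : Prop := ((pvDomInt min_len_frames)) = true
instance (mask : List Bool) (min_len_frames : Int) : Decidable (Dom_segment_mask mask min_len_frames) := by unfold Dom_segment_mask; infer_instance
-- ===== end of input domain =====

-- B replaces A's sentinel/None state machine by staged edge detection (pad, rising/falling edges, zip, length filter); alternative decomposition, same O(n) cost.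

-- ===== PORT A =====
-- hand port of Python's enumerate starting at index i (exact: pairs each element with its 0-based index)
def pvEnumFrom (i : Int) : List Bool → List (Int × Bool)
  | [] => []
  | x :: xs => (i, x) :: pvEnumFrom (i + 1) xs

-- one iteration of A's loop body: state = (out, s)
def segAStep (min_len_frames : Int) (st : List (Int × Int) × Option Int) (p : Int × Bool) :
    List (Int × Int) × Option Int :=
  match st, p with
  | (out, s), (i, v) =>
    if v && s.isNone then (out, some i)
    else if !v && s.isSome then
      match s with
      | some sv => (if i - sv ≥ min_len_frames then out ++ [(sv, i)] else out, none)
      | none => (out, none)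
    else (out, s)

def segment_mask (mask : List Bool) (min_len_frames : Int) : List (Int × Int) :=
  ((pvEnumFrom 0 (mask ++ [false])).foldl (segAStep min_len_frames) ([], none)).1

-- ===== PORT B =====
-- indexing padded[i] / padded[i+1] is ported with getD: every index produced by
-- range(len(padded)-1) is in range, so this is exact on those accesses
def segment_mask_alt (mask : List Bool) (min_len_frames : Int) : List (Int × Int) :=
  let padded := [false] ++ mask ++ [false]
  let starts := (List.range (padded.length - 1)).filterMap
    (fun i => if padded.getD (i + 1) false && !(padded.getD i false) then some ((i : Int)) else none)
  let ends := (List.range (padded.length - 1)).filterMap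
    (fun i => if padded.getD i false && !(padded.getD (i + 1) false) then some ((i : Int)) else none)
  (starts.zip ends).filter (fun p => decide (p.2 - p.1 ≥ min_len_frames))

-- ===== PRECONDITION & SPEC =====
def Spec_segment_mask (mask : List Bool) (min_len_frames : Int) (out : List (Int × Int)) : Prop := out = segment_mask_alt mask min_len_frames
instance (mask : List Bool) (min_len_frames : Int) (out : List (Int × Int)) : Decidable (Spec_segment_mask mask min_len_frames out) := by unfold Spec_segment_mask; infer_instance

-- ===== CLAIM (what is proved, stated in full; the proofs are below) =====
def Claim_equal_segment_mask : Prop := ∀ (mask : List Bool) (min_len_frames : Int), Dom_segment_mask mask min_len_frames → Spec_segment_mask mask min_len_frames (segment_mask mask min_len_frames)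

-- ===== LEMMAS AND PROOFS =====

-- proof-only recursive forms of B's edge lists: rising / falling edge indices of
-- prev :: u, in mask coordinates starting at i
def rises : Bool → List Bool → Int → List Int
  | _, [], _ => []
  | prev, c :: t, i => (if c && !prev then [i] else []) ++ rises c t (i + 1)

def falls : Bool → List Bool → Int → List Int
  | _, [], _ => []
  | prev, c :: t, i => (if prev && !c then [i] else []) ++ falls c t (i + 1)

def filterSeg (m : Int) (l : List (Int × Int)) : List (Int × Int) :=
  l.filter (fun p => decide (p.2 - p.1 ≥ m))

-- the four cases of A's loop body
lemma stepA_nf (m i : Int) (out : List (Int × Int)) :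
    segAStep m (out, none) (i, false) = (out, none) := by simp [segAStep]
lemma stepA_sf (m i j : Int) (out : List (Int × Int)) :
    segAStep m (out, some j) (i, false)
      = (if i - j ≥ m then out ++ [(j, i)] else out, none) := by simp [segAStep]
lemma stepA_nt (m i : Int) (out : List (Int × Int)) :
    segAStep m (out, none) (i, true) = (out, some i) := by simp [segAStep]
lemma stepA_st (m i j : Int) (out : List (Int × Int)) :
    segAStep m (out, some j) (i, true) = (out, some j) := by simp [segAStep]

-- main invariant: A's fold equals the filtered zip of the edge lists, with a
-- pending open interval j prepended to the rises when s = some j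
lemma seg_main (n : Nat) : ∀ (t : List Bool), t.length ≤ n → ∀ (m i : Int) (out : List (Int × Int)),
    (((pvEnumFrom i (t ++ [false])).foldl (segAStep m) (out, none)).1
        = out ++ filterSeg m ((rises false (t ++ [false]) i).zip (falls false (t ++ [false]) i)))
    ∧ ∀ j : Int,
      ((pvEnumFrom i (t ++ [false])).foldl (segAStep m) (out, some j)).1
        = out ++ filterSeg m ((j :: rises true (t ++ [false]) i).zip (falls true (t ++ [false]) i)) := by
  induction n with
  | zero =>
    intro t ht m i out
    have h0 : t = [] := List.length_eq_zero_iff.mp (Nat.le_zero.mp ht)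
    subst h0
    constructor
    · simp [pvEnumFrom, stepA_nf, rises, falls, filterSeg]
    · intro j
      simp only [List.nil_append, pvEnumFrom, List.foldl_cons, List.foldl_nil, stepA_sf]
      simp only [rises, falls, filterSeg]
      by_cases h : i - j ≥ m <;> simp [h]
  | succ n ih =>
    intro t ht m i out
    cases t with
    | nil => exact ih [] (Nat.zero_le _) m i out
    | cons v t' =>
      have ht' : t'.length ≤ n := by simpa using ht
      cases v with
      | false =>
        constructor
        · simp only [List.cons_append, pvEnumFrom, List.foldl_cons, stepA_nf]
          rw [(ih t' ht' m (i + 1) out).1]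
          simp [rises, falls]
        · intro j
          simp only [List.cons_append, pvEnumFrom, List.foldl_cons, stepA_sf]
          simp only [rises, falls, Bool.false_and, Bool.true_and, Bool.not_false, if_true,
            List.singleton_append, List.zip_cons_cons, filterSeg, List.filter_cons]
          by_cases h : i - j ≥ m
          · rw [if_pos h, (ih t' ht' m (i + 1) (out ++ [(j, i)])).1]
            simp [h, filterSeg, List.append_assoc]
          · rw [if_neg h, (ih t' ht' m (i + 1) out).1]
            simp [h, filterSeg]
      | true =>
        constructor
        · simp only [List.cons_append, pvEnumFrom, List.foldl_cons, stepA_nt]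
          rw [(ih t' ht' m (i + 1) out).2 i]
          simp [rises, falls]
        · intro j
          simp only [List.cons_append, pvEnumFrom, List.foldl_cons, stepA_st]
          rw [(ih t' ht' m (i + 1) out).2 j]
          simp [rises, falls]

-- shifting the start index shifts every edge index
lemma rises_shift (u : List Bool) : ∀ (prev : Bool) (i : Int),
    rises prev u (i + 1) = (rises prev u i).map (· + 1) := by
  induction u with
  | nil => intro prev i; simp [rises]
  | cons c t ih =>
    intro prev i
    simp only [rises, List.map_append, ih c]
    by_cases h : c && !prev <;> simp [h]

lemma falls_shift (u : List Bool) : ∀ (prev : Bool) (i : Int),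
    falls prev u (i + 1) = (falls prev u i).map (· + 1) := by
  induction u with
  | nil => intro prev i; simp [falls]
  | cons c t ih =>
    intro prev i
    simp only [falls, List.map_append, ih c]
    by_cases h : c <;> by_cases h2 : prev <;> simp [h, h2]

-- bridge: B's range/filterMap comprehension over prev :: u equals the recursive edge list
lemma starts_bridge (u : List Bool) : ∀ (prev : Bool),
    (List.range u.length).filterMap
      (fun k => if u.getD k false && !((prev :: u).getD k false) then some ((k : Int)) else none)
    = rises prev u 0 := by
  induction u with
  | nil => intro prev; simp [rises]
  | cons c t ih =>
    intro prev
    simp only [List.length_cons]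
    rw [List.range_succ_eq_map, List.filterMap_cons, List.filterMap_map]
    have htail : List.filterMap ((fun k => if (c :: t).getD k false
            && !((prev :: c :: t).getD k false) then some ((k : Int)) else none) ∘ Nat.succ)
          (List.range t.length)
        = (rises c t 0).map (· + 1) := by
      rw [← ih c, List.map_filterMap]
      apply List.filterMap_congr
      intro k _
      simp only [Function.comp_apply, List.getD_cons_succ]
      by_cases h : t.getD k false && !((c :: t).getD k false) <;> simp [h] <;> push_cast <;> ring
    rw [htail]
    simp only [List.getD_cons_zero]
    by_cases h : c && !prev <;> simp [h, rises, ← rises_shift]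

lemma ends_bridge (u : List Bool) : ∀ (prev : Bool),
    (List.range u.length).filterMap
      (fun k => if (prev :: u).getD k false && !(u.getD k false) then some ((k : Int)) else none)
    = falls prev u 0 := by
  induction u with
  | nil => intro prev; simp [falls]
  | cons c t ih =>
    intro prev
    simp only [List.length_cons]
    rw [List.range_succ_eq_map, List.filterMap_cons, List.filterMap_map]
    have htail : List.filterMap ((fun k => if (prev :: c :: t).getD k false
            && !((c :: t).getD k false) then some ((k : Int)) else none) ∘ Nat.succ)
          (List.range t.length)
        = (falls c t 0).map (· + 1) := by
      rw [← ih c, List.map_filterMap]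
      apply List.filterMap_congr
      intro k _
      simp only [Function.comp_apply, List.getD_cons_succ]
      by_cases h : (c :: t).getD k false && !(t.getD k false) <;> simp [h] <;> push_cast <;> ring
    rw [htail]
    simp only [List.getD_cons_zero]
    by_cases h : prev && !c <;> simp [h, falls, ← falls_shift]

lemma alt_eq (mask : List Bool) (m : Int) :
    segment_mask_alt mask m
      = filterSeg m ((rises false (mask ++ [false]) 0).zip (falls false (mask ++ [false]) 0)) := by
  unfold segment_mask_alt filterSeg
  have hlen : ([false] ++ mask ++ [false]).length - 1 = (mask ++ [false]).length := by
    simp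
  have hget : ∀ k : Nat, ([false] ++ mask ++ [false]).getD (k + 1) false
      = (mask ++ [false]).getD k false := by
    intro k; rfl
  have hget0 : ∀ k : Nat, ([false] ++ mask ++ [false]).getD k false
      = (false :: (mask ++ [false])).getD k false := by
    intro k; rfl
  simp only [hlen]
  have hs : (List.range (mask ++ [false]).length).filterMap
      (fun i => if ([false] ++ mask ++ [false]).getD (i + 1) false
          && !(([false] ++ mask ++ [false]).getD i false) then some ((i : Int)) else none)
      = rises false (mask ++ [false]) 0 := by
    rw [← starts_bridge (mask ++ [false]) false]
    apply List.filterMap_congr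
    intro i _
    rw [hget i, hget0 i]
  have he : (List.range (mask ++ [false]).length).filterMap
      (fun i => if ([false] ++ mask ++ [false]).getD i false
          && !(([false] ++ mask ++ [false]).getD (i + 1) false) then some ((i : Int)) else none)
      = falls false (mask ++ [false]) 0 := by
    rw [← ends_bridge (mask ++ [false]) false]
    apply List.filterMap_congr
    intro i _
    rw [hget i, hget0 i]
  rw [hs, he]

-- ===== VERDICT (by name: the statement is the Claim_ definition above) =====
theorem segment_mask_spec : Claim_equal_segment_mask := by
  intro mask m _
  unfold Spec_segment_mask segment_mask
  rw [(seg_main mask.length mask le_rfl m 0 []).1, alt_eq]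
  simp
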